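-- pv_equiv track=rewrite | github.com/netman92/codility-solutions | python/lesson2/max_counters_with_test.py | solution
-- ===== SOURCE A (Python) =====
-- def solution(N, A):
--     to_return = [0]*N
--     max_counter = 0
--     current_max_counter = 0
--
--     for index in A:
--         if 1 <= index <= N:
--             if max_counter > to_return[index-1]:
--                 to_return[index-1] = max_counter
--             to_return[index-1] += 1
--
--             #max
--             if current_max_counter < to_return[index-1]:
--                 current_max_counter = to_return[index-1]
--         else:
--             max_counter = current_max_counter
--
--     for index in range(0, N):
--         if to_return[index] < max_counter:
--             to_return[index] = max_counter
--
--     return to_return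
-- ===== SOURCE B (Python) =====
-- def solution(N, A):
--     counters = [0] * N
--     current_max = 0
--     for index in A:
--         if 1 <= index <= N:
--             counters[index - 1] += 1
--             current_max = max(current_max, counters[index - 1])
--         else:
--             counters = [current_max] * N
--     return counters
-- ===== Notes on version B (the rewrite author's own statement) =====
-- stated objective: alternative
-- what changed: B keeps the real counter values eagerly, performing each max operation as an immediate full overwrite of the array, instead of A's lazy deferred-max bookkeeping with a final reconciliation pass.
import Mathlib
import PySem

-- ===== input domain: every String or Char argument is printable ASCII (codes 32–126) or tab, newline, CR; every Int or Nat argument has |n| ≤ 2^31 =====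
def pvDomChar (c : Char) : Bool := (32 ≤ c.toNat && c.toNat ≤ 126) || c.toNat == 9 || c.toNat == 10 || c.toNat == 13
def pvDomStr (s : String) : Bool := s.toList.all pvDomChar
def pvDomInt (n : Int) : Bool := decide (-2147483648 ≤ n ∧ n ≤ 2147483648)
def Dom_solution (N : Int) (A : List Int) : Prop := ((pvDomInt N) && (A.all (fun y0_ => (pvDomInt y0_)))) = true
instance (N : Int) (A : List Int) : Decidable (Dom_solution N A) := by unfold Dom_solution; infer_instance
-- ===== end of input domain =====

-- B replaces A's lazy deferred-max bookkeeping (and its final reconciliation pass) by an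
-- eager full overwrite of the counter array at each max operation; alternative, not faster.

-- ===== PORT A =====
-- one iteration of A's main loop over A's state (to_return, max_counter, current_max_counter)
def stepA (N : Int) (s : List Int × Int × Int) (index : Int) : List Int × Int × Int :=
  if 1 ≤ index ∧ index ≤ N then
    -- guard guarantees 0 ≤ index-1 < len, so List.set/getD at (index-1).toNat is exact
    let j := (index - 1).toNat
    let tr1 := if s.2.1 > s.1.getD j 0 then s.1.set j s.2.1 else s.1
    let tr2 := tr1.set j (tr1.getD j 0 + 1)
    (tr2, s.2.1, if s.2.2 < tr2.getD j 0 then tr2.getD j 0 else s.2.2)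
  else
    (s.1, s.2.2, s.2.2)

def solution (N : Int) (A : List Int) : List Int :=
  let s := A.foldl (stepA N) (List.replicate N.toNat 0, 0, 0)
  -- final pass: for index in range(0, N): if to_return[index] < max_counter: overwrite
  (PySem.List.pyRange 0 N 1).foldl
    (fun acc i => if acc.getD i.toNat 0 < s.2.1 then acc.set i.toNat s.2.1 else acc) s.1

-- ===== PORT B =====
-- one iteration of B's loop over B's state (counters, current_max)
def stepB (N : Int) (s : List Int × Int) (index : Int) : List Int × Int :=
  if 1 ≤ index ∧ index ≤ N then
    let j := (index - 1).toNat
    let cs := s.1.set j (s.1.getD j 0 + 1)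
    (cs, max s.2 (cs.getD j 0))
  else
    (List.replicate N.toNat s.2, s.2)

def solution_alt (N : Int) (A : List Int) : List Int :=
  (A.foldl (stepB N) (List.replicate N.toNat 0, 0)).1

-- ===== PRECONDITION & SPEC =====
def Spec_solution (N : Int) (A : List Int) (out : List Int) : Prop := out = solution_alt N A
instance (N : Int) (A : List Int) (out : List Int) : Decidable (Spec_solution N A out) := by unfold Spec_solution; infer_instance

-- ===== CLAIM (what is proved, stated in full; the proofs are below) =====
def Claim_equal_solution : Prop := ∀ (N : Int) (A : List Int), Dom_solution N A → Spec_solution N A (solution N A)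

-- ===== LEMMAS AND PROOFS =====

-- invariant tying A's lazy state to B's eager one: B's counters are A's values with the
-- pending max applied; the running maxima agree; everything is bounded by the running max
def LoopInv (n : Nat) (sA : List Int × Int × Int) (sB : List Int × Int) : Prop :=
  sA.1.length = n ∧ sB.1.length = n ∧ sB.2 = sA.2.2 ∧ sA.2.1 ≤ sA.2.2 ∧
  (∀ i, i < n → sB.1.getD i 0 = max (sA.1.getD i 0) sA.2.1) ∧
  (∀ i, i < n → sA.1.getD i 0 ≤ sA.2.2)

theorem getD_set_self (l : List Int) (j : Nat) (a : Int) (h : j < l.length) :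
    (l.set j a).getD j 0 = a := by
  simp [List.getD, h]

theorem getD_set_ne (l : List Int) (i j : Nat) (a : Int) (h : j ≠ i) :
    (l.set j a).getD i 0 = l.getD i 0 := by
  simp [List.getD, List.getElem?_set_ne h]

theorem pyRange_toNat (N : Int) :
    PySem.List.pyRange 0 N 1 = PySem.List.pyRange 0 (N.toNat : Int) 1 := by
  by_cases h : 0 ≤ N
  · rw [Int.toNat_of_nonneg h]
  · rw [PySem.List.pyRange_one_eq_nil (by omega), PySem.List.pyRange_one_eq_nil (by omega)]

theorem fillA_spec (m : Int) : ∀ (k : Nat) (l : List Int), k ≤ l.length →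
    (PySem.List.pyRange 0 (k : Int) 1).foldl
        (fun acc i => if acc.getD i.toNat 0 < m then acc.set i.toNat m else acc) l
      = (l.take k).map (fun v => if v < m then m else v) ++ l.drop k := by
  intro k
  induction k with
  | zero => intro l _; simp [PySem.List.pyRange_one_eq_nil (le_refl (0:Int))]
  | succ k ih =>
    intro l h
    have hr : PySem.List.pyRange 0 ((k+1 : Nat) : Int) 1
        = PySem.List.pyRange 0 (k : Int) 1 ++ [(k : Int)] := by
      push_cast
      exact PySem.List.pyRange_one_succ_right (by omega)
    have hk : k < l.length := by omega
    have hlen : ((l.take k).map (fun v => if v < m then m else v)).length = k := by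
      simp; omega
    have hget : (((l.take k).map (fun v => if v < m then m else v)) ++ l.drop k).getD k 0
        = l[k] := by
      rw [List.getD_eq_getElem?_getD, List.getElem?_append_right (by omega), hlen]
      simp [hk]
    rw [hr, List.foldl_append, ih l (by omega)]
    simp only [List.foldl_cons, List.foldl_nil, Int.toNat_natCast, hget]
    have ht : l.take (k+1) = l.take k ++ [l[k]] := by
      rw [List.take_add_one]; simp [List.getElem?_eq_getElem hk]
    have htake : (l.take (k+1)).map (fun v => if v < m then m else v)
        = (l.take k).map (fun v => if v < m then m else v) ++ [if l[k] < m then m else l[k]] := by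
      rw [ht, List.map_append]; rfl
    by_cases hc : l[k] < m
    · rw [if_pos hc, htake, if_pos hc,
        List.set_append_right _ _ (by omega), hlen, Nat.sub_self,
        ← List.getElem_cons_drop hk, List.set_cons_zero]
      simp
    · rw [if_neg hc, htake, if_neg hc, ← List.getElem_cons_drop hk]
      simp

theorem step_inv (N : Int) (x : Int) (sA : List Int × Int × Int) (sB : List Int × Int)
    (h : LoopInv N.toNat sA sB) : LoopInv N.toNat (stepA N sA x) (stepB N sB x) := by
  obtain ⟨h1, h2, h3, h4, h5, h6⟩ := h
  by_cases hg : 1 ≤ x ∧ x ≤ N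
  · have hj : (x - 1).toNat < N.toNat := by omega
    simp only [stepA, stepB, if_pos hg]
    set j := (x - 1).toNat with hjdef
    set tr1 := if sA.2.1 > sA.1.getD j 0 then sA.1.set j sA.2.1 else sA.1 with htr1
    have ltr1 : tr1.length = N.toNat := by rw [htr1]; split_ifs <;> simp [h1]
    have tr1j : tr1.getD j 0 = max (sA.1.getD j 0) sA.2.1 := by
      rw [htr1]; split_ifs with hc
      · rw [getD_set_self _ _ _ (by omega)]; omega
      · omega
    have tr1i : ∀ i, i ≠ j → tr1.getD i 0 = sA.1.getD i 0 := by
      intro i hi; rw [htr1]; split_ifs with hc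
      · exact getD_set_ne _ _ _ _ (Ne.symm hi)
      · rfl
    have hBj : sB.1.getD j 0 = max (sA.1.getD j 0) sA.2.1 := h5 j hj
    have t2j : (tr1.set j (tr1.getD j 0 + 1)).getD j 0 = tr1.getD j 0 + 1 :=
      getD_set_self _ _ _ (by omega)
    have bsj : (sB.1.set j (sB.1.getD j 0 + 1)).getD j 0 = sB.1.getD j 0 + 1 :=
      getD_set_self _ _ _ (by omega)
    refine ⟨by simp [ltr1], by simp [h2], ?_, ?_, ?_, ?_⟩
    · dsimp only
      rw [t2j, bsj, tr1j, hBj, h3]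
      split_ifs <;> omega
    · dsimp only
      rw [t2j, tr1j]
      split_ifs <;> omega
    · intro i hi
      dsimp only
      by_cases hij : i = j
      · subst hij
        rw [t2j, bsj, tr1j, hBj]
        omega
      · rw [getD_set_ne _ _ _ _ (fun e => hij e.symm), getD_set_ne _ _ _ _ (fun e => hij e.symm),
          tr1i i hij, h5 i hi]
    · intro i hi
      dsimp only
      by_cases hij : i = j
      · subst hij
        rw [t2j, tr1j]
        split_ifs <;> omega
      · rw [getD_set_ne _ _ _ _ (fun e => hij e.symm), tr1i i hij]
        have := h6 i hi
        split_ifs <;> omega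
  · simp only [stepA, stepB, if_neg hg]
    refine ⟨h1, by simp, by rw [h3], le_refl _, ?_, ?_⟩
    · intro i hi
      dsimp only
      have hrep : (List.replicate N.toNat sB.2).getD i 0 = sB.2 := by
        simp [List.getD, hi]
      rw [hrep, h3]
      have := h6 i hi
      omega
    · intro i hi
      exact h6 i hi

theorem fold_inv (N : Int) (A : List Int) (sA : List Int × Int × Int) (sB : List Int × Int)
    (h : LoopInv N.toNat sA sB) :
    LoopInv N.toNat (A.foldl (stepA N) sA) (A.foldl (stepB N) sB) := by
  induction A generalizing sA sB with
  | nil => exact h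
  | cons x xs ih => exact ih _ _ (step_inv N x sA sB h)

-- ===== VERDICT (by name: the statement is the Claim_ definition above) =====
theorem solution_spec : Claim_equal_solution := by
  intro N A _
  unfold Spec_solution solution solution_alt
  have h0 : LoopInv N.toNat (List.replicate N.toNat 0, 0, 0) (List.replicate N.toNat 0, 0) := by
    refine ⟨by simp, by simp, rfl, le_refl _, ?_, ?_⟩ <;>
      · intro i hi
        simp [List.getD, hi]
  have hInv := fold_inv N A _ _ h0
  set sA := A.foldl (stepA N) (List.replicate N.toNat 0, 0, 0) with hsA
  set sB := A.foldl (stepB N) (List.replicate N.toNat 0, 0) with hsB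
  obtain ⟨hlA, hlB, _, _, hmax, _⟩ := hInv
  dsimp only
  rw [pyRange_toNat, ← hlA, fillA_spec sA.2.1 sA.1.length sA.1 (le_refl _)]
  simp only [List.take_length, List.drop_length, List.append_nil]
  apply List.ext_getElem
  · simp [hlA, hlB]
  · intro i h1 h2
    have hi : i < N.toNat := by simp at h1; omega
    have e1 : sA.1.getD i 0 = sA.1[i]'(by omega) := List.getD_eq_getElem _ _ (by omega)
    have e2 : sB.1.getD i 0 = sB.1[i]'(by omega) := List.getD_eq_getElem _ _ (by omega)
    have := hmax i hi
    rw [e1, e2] at this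
    simp only [List.getElem_map]
    rw [this]
    split_ifs with hc <;> omega
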